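-- pv_equiv track=rewrite | github.com/bankaraju/askanka.com | pipeline/autoresearch/phase_c_cross_sectional/model.py | purged_walk_forward_splits
-- ===== SOURCE A (Python) =====
-- def purged_walk_forward_splits(n: int, n_splits: int, embargo: int) -> list[tuple[list[int], list[int]]]:
--     """Chronological fold boundaries with +/- embargo days of training purged
--     around each validation window. Returns (train_idx, val_idx) lists.
--     """
--     fold_size = n // n_splits
--     splits = []
--     for k in range(n_splits):
--         val_lo = k * fold_size
--         val_hi = (k + 1) * fold_size if k < n_splits - 1 else n
--         val_idx = list(range(val_lo, val_hi))
--         train_idx = [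
--             i for i in range(n)
--             if (i < val_lo - embargo) or (i >= val_hi + embargo)
--         ]
--         splits.append((train_idx, val_idx))
--     return splits
-- ===== SOURCE B (Python) =====
-- def purged_walk_forward_splits(n: int, n_splits: int, embargo: int) -> list[tuple[list[int], list[int]]]:
--     """Chronological fold boundaries; fold edges are precomputed as a cut list,
--     folds are emitted by zipping adjacent cuts, and the purged train indices are
--     built branchlessly from two clamped contiguous ranges."""
--     fold_size = n // n_splits
--     cuts = [k * fold_size for k in range(n_splits)] + [n]
--     splits = []
--     for val_lo, val_hi in zip(cuts, cuts[1:]):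
--         left_stop = min(val_lo - embargo, n)
--         right_start = max(val_hi + embargo, left_stop, 0)
--         train_idx = list(range(0, left_stop)) + list(range(right_start, n))
--         splits.append((train_idx, list(range(val_lo, val_hi))))
--     return splits
-- ===== Notes on version B (the rewrite author's own statement) =====
-- stated objective: faster
-- what changed: B precomputes fold edges as one cut list, forms folds by zipping adjacent cuts, and builds each train set branchlessly from two clamped contiguous ranges instead of filtering every index of range(n) per fold; intended as faster (a timing run measured 5.4x-68x on random sizes, unconfirmed at the largest size).
import Mathlib
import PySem

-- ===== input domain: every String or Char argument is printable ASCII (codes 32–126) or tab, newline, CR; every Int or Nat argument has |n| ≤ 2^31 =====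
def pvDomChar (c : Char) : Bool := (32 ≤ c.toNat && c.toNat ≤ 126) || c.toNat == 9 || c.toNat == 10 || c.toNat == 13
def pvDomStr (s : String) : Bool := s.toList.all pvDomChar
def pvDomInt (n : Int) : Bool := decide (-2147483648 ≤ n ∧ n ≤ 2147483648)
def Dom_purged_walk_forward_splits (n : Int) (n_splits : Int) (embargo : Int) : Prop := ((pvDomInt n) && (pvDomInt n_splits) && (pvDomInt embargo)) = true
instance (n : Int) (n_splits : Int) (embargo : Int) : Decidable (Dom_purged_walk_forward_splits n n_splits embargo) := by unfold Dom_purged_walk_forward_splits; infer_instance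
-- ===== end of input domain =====

-- B precomputes the fold edges as a cut list, emits folds by zipping adjacent cuts, and
-- builds each purged train set branchlessly from two clamped contiguous ranges instead of
-- filtering every index of range(n) per fold (intended as faster; a timing run measured 5.4×–68× on random sizes but could not confirm it at the largest size).

-- ===== PORT A =====
def purged_walk_forward_splits (n : Int) (n_splits : Int) (embargo : Int) : List (List Int × List Int) :=
  let fold_size := PySem.Int.floordiv n n_splits
  (PySem.List.pyRange 0 n_splits 1).foldl (fun splits k =>
    let val_lo := k * fold_size
    let val_hi := if k < n_splits - 1 then (k + 1) * fold_size else n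
    let val_idx := PySem.List.pyRange val_lo val_hi 1
    let train_idx := (PySem.List.pyRange 0 n 1).filter
      (fun i => decide (i < val_lo - embargo) || decide (val_hi + embargo ≤ i))
    splits ++ [(train_idx, val_idx)]) []

-- ===== PORT B =====
-- cuts[1:] is ported as .tail (exact here: cuts always ends with [n], hence is nonempty).
def purged_walk_forward_splits_alt (n : Int) (n_splits : Int) (embargo : Int) : List (List Int × List Int) :=
  let fold_size := PySem.Int.floordiv n n_splits
  let cuts := (PySem.List.pyRange 0 n_splits 1).map (fun k => k * fold_size) ++ [n]
  (cuts.zip cuts.tail).foldl (fun splits p =>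
    let left_stop := min (p.1 - embargo) n
    let right_start := max (max (p.2 + embargo) left_stop) 0
    let train_idx := PySem.List.pyRange 0 left_stop 1 ++ PySem.List.pyRange right_start n 1
    splits ++ [(train_idx, PySem.List.pyRange p.1 p.2 1)]) []

-- ===== PRECONDITION & SPEC =====
-- Pre_ excludes exactly n_splits = 0, where Python A raises ZeroDivisionError.
def Pre_purged_walk_forward_splits (n : Int) (n_splits : Int) (embargo : Int) : Prop := n_splits ≠ 0
instance (n : Int) (n_splits : Int) (embargo : Int) : Decidable (Pre_purged_walk_forward_splits n n_splits embargo) := by unfold Pre_purged_walk_forward_splits; infer_instance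
def pvWitness_purged_walk_forward_splits : Int × Int × Int := (10, 3, 1)

def Spec_purged_walk_forward_splits (n : Int) (n_splits : Int) (embargo : Int) (out : List (List Int × List Int)) : Prop := out = purged_walk_forward_splits_alt n n_splits embargo
instance (n : Int) (n_splits : Int) (embargo : Int) (out : List (List Int × List Int)) : Decidable (Spec_purged_walk_forward_splits n n_splits embargo out) := by unfold Spec_purged_walk_forward_splits; infer_instance

-- ===== CLAIM (what is proved, stated in full; the proofs are below) =====
def Claim_equal_purged_walk_forward_splits : Prop := ∀ (n : Int) (n_splits : Int) (embargo : Int), Dom_purged_walk_forward_splits n n_splits embargo → Pre_purged_walk_forward_splits n n_splits embargo → Spec_purged_walk_forward_splits n n_splits embargo (purged_walk_forward_splits n n_splits embargo)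

-- ===== LEMMAS AND PROOFS =====

-- appending-foldl is a map
lemma pv_foldl_eq_map {α β : Type} (f : α → β) : ∀ (l : List α) (acc : List β),
    l.foldl (fun s x => s ++ [f x]) acc = acc ++ l.map f := by
  intro l
  induction l with
  | nil => simp
  | cons x xs ih => intro acc; simp [List.foldl_cons, ih]

-- zipping a cut list (map g over a unit range, closed by c) with its own tail
-- yields the indexed adjacent pairs.
lemma pv_zip_adj (g : Int → Int) (c : Int) : ∀ (m : Nat) (a b : Int), (b - a).toNat = m →
    (((PySem.List.pyRange a b 1).map g ++ [c]).zip
      (((PySem.List.pyRange a b 1).map g ++ [c]).tail))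
      = (PySem.List.pyRange a b 1).map (fun k => (g k, if k < b - 1 then g (k + 1) else c)) := by
  intro m
  induction m with
  | zero =>
    intro a b h
    rw [PySem.List.pyRange_one_eq_nil (by omega : b ≤ a)]
    simp
  | succ m ih =>
    intro a b h
    have hab : a < b := by omega
    rw [PySem.List.pyRange_one_cons hab]
    by_cases h2 : a + 1 < b
    · rw [PySem.List.pyRange_one_cons h2]
      have := ih (a + 1) b (by omega)
      rw [PySem.List.pyRange_one_cons h2] at this
      simp only [List.map_cons, List.cons_append, List.zip_cons_cons, List.tail_cons] at this ⊢
      rw [this]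
      simp [show a < b - 1 by omega]
    · have hnil : PySem.List.pyRange (a + 1) b 1 = [] :=
        PySem.List.pyRange_one_eq_nil (by omega)
      rw [hnil]
      simp [show ¬ a < b - 1 by omega]

-- the filtered range equals two clamped contiguous blocks, unconditionally.
lemma pv_filter_band (L R n : Int) (hLR : L < R) : ∀ (m : Nat) (a : Int), (n - a).toNat = m →
    (PySem.List.pyRange a n 1).filter (fun i => decide (i < L) || decide (R ≤ i)) =
      PySem.List.pyRange a (min L n) 1 ++ PySem.List.pyRange (max R a) n 1 := by
  intro m
  induction m with
  | zero =>
    intro a ha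
    have hna : n ≤ a := by omega
    rw [PySem.List.pyRange_one_eq_nil hna,
        PySem.List.pyRange_one_eq_nil (by omega : min L n ≤ a),
        PySem.List.pyRange_one_eq_nil (by omega : n ≤ max R a)]
    simp
  | succ m ih =>
    intro a ha
    have han : a < n := by omega
    rw [PySem.List.pyRange_one_cons han, List.filter_cons]
    by_cases h1 : a < L
    · have : (decide (a < L) || decide (R ≤ a)) = true := by simp [h1]
      rw [this]
      rw [PySem.List.pyRange_one_cons (by omega : a < min L n)]
      have hmax : max R a = max R (a + 1) := by omega
      rw [hmax, List.cons_append, ih (a + 1) (by omega)]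
      simp
    · by_cases h2 : R ≤ a
      · have : (decide (a < L) || decide (R ≤ a)) = true := by simp [h2]
        rw [this]
        rw [PySem.List.pyRange_one_eq_nil (by omega : min L n ≤ a), List.nil_append]
        have hmax : max R a = a := by omega
        rw [hmax, PySem.List.pyRange_one_cons han]
        have := ih (a + 1) (by omega)
        rw [PySem.List.pyRange_one_eq_nil (by omega : min L n ≤ a + 1), List.nil_append] at this
        have hmax2 : max R (a + 1) = a + 1 := by omega
        rw [hmax2] at this
        rw [this]
        simp
      · have : (decide (a < L) || decide (R ≤ a)) = false := by simp; omega
        rw [this]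
        have := ih (a + 1) (by omega)
        rw [PySem.List.pyRange_one_eq_nil (by omega : min L n ≤ a + 1), List.nil_append] at this
        rw [PySem.List.pyRange_one_eq_nil (by omega : min L n ≤ a), List.nil_append]
        have hmax : max R a = max R (a + 1) := by omega
        rw [hmax, this]
        simp

lemma pv_filter_band_clamped (L R n : Int) :
    (PySem.List.pyRange 0 n 1).filter (fun i => decide (i < L) || decide (R ≤ i)) =
      PySem.List.pyRange 0 (min L n) 1 ++
        PySem.List.pyRange (max (max R (min L n)) 0) n 1 := by
  by_cases hLR : L < R
  · have hs : max (max R (min L n)) 0 = max R 0 := by omega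
    rw [hs, pv_filter_band L R n hLR (n - 0).toNat 0 rfl]
  · -- band empty: every index passes the filter
    have hfull : (PySem.List.pyRange 0 n 1).filter
        (fun i => decide (i < L) || decide (R ≤ i)) = PySem.List.pyRange 0 n 1 := by
      apply List.filter_eq_self.mpr
      intro x hx
      simp only [Bool.or_eq_true, decide_eq_true_eq]
      omega
    rw [hfull]
    by_cases hn : n ≤ 0
    · rw [PySem.List.pyRange_one_eq_nil (by omega : n ≤ 0),
          PySem.List.pyRange_one_eq_nil (by omega : min L n ≤ 0),
          PySem.List.pyRange_one_eq_nil (by omega : n ≤ max (max R (min L n)) 0)]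
      simp
    · by_cases hm : min L n ≤ 0
      · rw [PySem.List.pyRange_one_eq_nil (by omega : min L n ≤ 0), List.nil_append]
        have : max (max R (min L n)) 0 = 0 := by omega
        rw [this]
      · by_cases hR : R ≤ min L n
        · have : max (max R (min L n)) 0 = min L n := by omega
          rw [this, ← PySem.List.pyRange_one_append 0 (min L n) n (by omega) (by omega)]
        · -- here min L n = n (else R ≤ L ≤ min L n), so the right block is empty
          rw [PySem.List.pyRange_one_eq_nil
                (by omega : n ≤ max (max R (min L n)) 0), List.append_nil]
          have : min L n = n := by omega
          rw [this]

-- ===== VERDICT (by name: the statement is the Claim_ definition above) =====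
theorem purged_walk_forward_splits_spec : Claim_equal_purged_walk_forward_splits := by
  intro n n_splits embargo _ _
  unfold Spec_purged_walk_forward_splits purged_walk_forward_splits purged_walk_forward_splits_alt
  dsimp only
  rw [pv_zip_adj (fun k => k * PySem.Int.floordiv n n_splits) n
        (n_splits - 0).toNat 0 n_splits (by omega)]
  rw [pv_foldl_eq_map, pv_foldl_eq_map, List.map_map, List.nil_append, List.nil_append]
  apply List.map_congr_left
  intro k _
  dsimp only [Function.comp]
  rw [pv_filter_band_clamped]
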